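-- pv_equiv track=rewrite | github.com/Paulocp02/automata | Proyecto.py | AutoSisNum
-- ===== SOURCE A (Python) =====
-- def AutoSisNum(entrada):
--     contador = 0
--     estado=0
--     error=None
--     continuar = True
--
--     while contador < len(entrada) and (continuar==True) :
--
--         simbolo = entrada[contador]
--
--         if estado==0:
--             if simbolo=='0':
--                 estado = 1
--             elif simbolo == '.':
--                 estado = 6
--             elif ('1' <= simbolo <= '9'):
--                 estado =5
--             else:
--                 error='0'
--                 continuar = False
--
--         elif estado==1:
--             if simbolo=='.':
--                 estado = 6
--             elif simbolo == 'X':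
--                 estado = 2
--             elif ('0' <= simbolo <= '7'):
--                 estado =8
--             else:
--                 error='1'
--                 continuar = False
--
--         elif estado==2:
--             if (('A' <= simbolo <= 'F')  or ('0' <= simbolo <= '9')):
--                 estado = 3
--             else:
--                 error='2'
--                 continuar = False
--
--         elif estado==3:
--             if (('A' <= simbolo <= 'F')  or ('0' <= simbolo <= '9')):
--                 estado = 4
--             else:
--                 error='3'
--                 continuar = False
--
--         elif estado==4:
--             if (('A' <= simbolo <= 'F')  or ('0' <= simbolo <= '9')):
--                 estado = 3
--             else:
--                 error='4'
--                 continuar = False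
--
--         elif estado==5:
--             if simbolo == '.':
--                 estado = 6
--             elif ('0' <= simbolo <= '9'):
--                 estado = 5
--             else:
--                 error='5'
--                 continuar = False
--
--         elif estado==6:
--             if ('0' <= simbolo <= '9'):
--                 estado = 7
--             else:
--                 error='6'
--                 continuar = False
--
--         elif estado==7:
--             if ('0' <= simbolo <= '9'):
--                 estado = 7
--             else:
--                 error='7'
--                 continuar = False
--
--         elif estado==8:
--             if ('0' <= simbolo <= '7'):
--                 estado = 8
--             else:
--                 error='8'
--                 continuar = False
--
--         contador+=1
--
--     if estado == 2 and contador == len(entrada):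
--         error = '2'
--
--     estadosAcepta =  estado in [3,4,5,7,8]
--     return (estadosAcepta, error)
-- ===== SOURCE B (Python) =====
-- # Recursive-descent parser over the number grammar: no DFA state variable; each
-- # grammar phase scans its longest run of a character class and derives the error
-- # code in closed form from the run length (e.g. hex parity picks '3' vs '4').
-- def _run(s, pred):
--     n = 0
--     while n < len(s) and pred(s[n]):
--         n += 1
--     return n
--
-- def _frac(s):                       # after the '.'
--     n = _run(s, lambda ch: '0' <= ch <= '9')
--     if n == len(s):
--         return (n > 0, None)
--     return (False, '6') if n == 0 else (True, '7')
--
-- def _decimal(s):                    # after a leading 1-9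
--     n = _run(s, lambda ch: '0' <= ch <= '9')
--     if n == len(s):
--         return (True, None)
--     if s[n] == '.':
--         return _frac(s[n + 1:])
--     return (True, '5')
--
-- def _octal(s):                      # after '0' and one octal digit
--     n = _run(s, lambda ch: '0' <= ch <= '7')
--     return (True, None) if n == len(s) else (True, '8')
--
-- def _hex(s):                        # after '0X'
--     n = _run(s, lambda ch: '0' <= ch <= '9' or 'A' <= ch <= 'F')
--     if n == len(s):
--         return (True, None) if n > 0 else (False, '2')
--     if n == 0:
--         return (False, '2')
--     return (True, '3') if n % 2 == 1 else (True, '4')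
--
-- def AutoSisNum(entrada):
--     if entrada == '':
--         return (False, None)
--     c = entrada[0]
--     if c == '.':
--         return _frac(entrada[1:])
--     if '1' <= c <= '9':
--         return _decimal(entrada[1:])
--     if c == '0':
--         rest = entrada[1:]
--         if rest == '':
--             return (False, None)
--         d = rest[0]
--         if d == '.':
--             return _frac(rest[1:])
--         if d == 'X':
--             return _hex(rest[1:])
--         if '0' <= d <= '7':
--             return _octal(rest[1:])
--         return (False, '1')
--     return (False, '0')
-- ===== Notes on version B (the rewrite author's own statement) =====
-- stated objective: alternative
-- what changed: Replaces the character-at-a-time DFA loop over a state variable with a recursive-descent parser: each grammar phase (decimal, fraction, octal, hex) scans its longest run of a character class and derives A's error code in closed form from the run length (hex parity picks '3' vs '4'), with no state variable or transition dispatch.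
import Mathlib
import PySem

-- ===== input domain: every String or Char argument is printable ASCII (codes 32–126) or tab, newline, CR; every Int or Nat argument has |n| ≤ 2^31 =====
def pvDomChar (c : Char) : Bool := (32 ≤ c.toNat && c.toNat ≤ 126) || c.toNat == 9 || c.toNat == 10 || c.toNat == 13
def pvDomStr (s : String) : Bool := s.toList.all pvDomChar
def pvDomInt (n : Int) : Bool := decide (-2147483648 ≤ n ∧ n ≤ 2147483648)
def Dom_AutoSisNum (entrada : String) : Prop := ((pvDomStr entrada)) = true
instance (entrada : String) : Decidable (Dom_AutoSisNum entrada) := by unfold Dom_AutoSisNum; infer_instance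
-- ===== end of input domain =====

-- B replaces A's DFA loop by a recursive-descent parser: each grammar phase scans its
-- longest run of a character class and derives the error code in closed form from the
-- run length; objective: alternative (same O(n) cost, no state variable).

-- ===== PORT A =====
-- loop body of A: the if/elif ladder; .inl = next state, .inr = error code (continuar=False)
def pasoA (estado : Int) (simbolo : Char) : Int ⊕ String :=
  if estado = 0 then
    if simbolo = '0' then .inl 1
    else if simbolo = '.' then .inl 6
    else if '1' ≤ simbolo ∧ simbolo ≤ '9' then .inl 5
    else .inr "0"
  else if estado = 1 then
    if simbolo = '.' then .inl 6
    else if simbolo = 'X' then .inl 2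
    else if '0' ≤ simbolo ∧ simbolo ≤ '7' then .inl 8
    else .inr "1"
  else if estado = 2 then
    if ('A' ≤ simbolo ∧ simbolo ≤ 'F') ∨ ('0' ≤ simbolo ∧ simbolo ≤ '9') then .inl 3
    else .inr "2"
  else if estado = 3 then
    if ('A' ≤ simbolo ∧ simbolo ≤ 'F') ∨ ('0' ≤ simbolo ∧ simbolo ≤ '9') then .inl 4
    else .inr "3"
  else if estado = 4 then
    if ('A' ≤ simbolo ∧ simbolo ≤ 'F') ∨ ('0' ≤ simbolo ∧ simbolo ≤ '9') then .inl 3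
    else .inr "4"
  else if estado = 5 then
    if simbolo = '.' then .inl 6
    else if '0' ≤ simbolo ∧ simbolo ≤ '9' then .inl 5
    else .inr "5"
  else if estado = 6 then
    if '0' ≤ simbolo ∧ simbolo ≤ '9' then .inl 7 else .inr "6"
  else if estado = 7 then
    if '0' ≤ simbolo ∧ simbolo ≤ '9' then .inl 7 else .inr "7"
  else if estado = 8 then
    if '0' ≤ simbolo ∧ simbolo ≤ '7' then .inl 8 else .inr "8"
  else .inl estado   -- no elif branch fires: estado, error, continuar unchanged

-- the while loop; returns (estado, error, characters left unread after the loop exits)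
def loopA : List Char → Int → Int × Option String × List Char
  | [], estado => (estado, none, [])
  | simbolo :: rest, estado =>
    match pasoA estado simbolo with
    | .inl e' => loopA rest e'
    | .inr err => (estado, some err, rest)

def AutoSisNum (entrada : String) : Bool × Option String :=
  let r := loopA entrada.toList 0
  -- contador == len(entrada)  ↔  no character is left unread
  let error := if r.1 = 2 ∧ r.2.2 = [] then some "2" else r.2.1
  (decide (r.1 ∈ ([3, 4, 5, 7, 8] : List Int)), error)

-- ===== PORT B =====
-- _run: length of the longest prefix satisfying pred; also returns the suffix s[n:]
-- (which stands for Source B's index arithmetic s[n], s[n+1:])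
def bRun (p : Char → Bool) : List Char → Nat × List Char
  | [] => (0, [])
  | c :: rest =>
    if p c then
      let r := bRun p rest
      (r.1 + 1, r.2)
    else (0, c :: rest)

def bIsDigit (c : Char) : Bool := decide ('0' ≤ c) && decide (c ≤ '9')
def bIsOct (c : Char) : Bool := decide ('0' ≤ c) && decide (c ≤ '7')
def bIsHex (c : Char) : Bool := bIsDigit c || (decide ('A' ≤ c) && decide (c ≤ 'F'))

def bFrac (s : List Char) : Bool × Option String :=
  let r := bRun bIsDigit s
  if r.2 = [] then (decide (r.1 > 0), none)
  else if r.1 = 0 then (false, some "6") else (true, some "7")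

def bDecimal (s : List Char) : Bool × Option String :=
  let r := bRun bIsDigit s
  match r.2 with
  | [] => (true, none)
  | c :: rest => if c = '.' then bFrac rest else (true, some "5")

def bOctal (s : List Char) : Bool × Option String :=
  let r := bRun bIsOct s
  if r.2 = [] then (true, none) else (true, some "8")

def bHex (s : List Char) : Bool × Option String :=
  let r := bRun bIsHex s
  if r.2 = [] then (if r.1 > 0 then (true, none) else (false, some "2"))
  else if r.1 = 0 then (false, some "2")
  else if r.1 % 2 = 1 then (true, some "3") else (true, some "4")

def AutoSisNum_alt (entrada : String) : Bool × Option String :=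
  match entrada.toList with
  | [] => (false, none)
  | c :: rest =>
    if c = '.' then bFrac rest
    else if decide ('1' ≤ c) && decide (c ≤ '9') then bDecimal rest
    else if c = '0' then
      match rest with
      | [] => (false, none)
      | d :: rest2 =>
        if d = '.' then bFrac rest2
        else if d = 'X' then bHex rest2
        else if bIsOct d then bOctal rest2
        else (false, some "1")
    else (false, some "0")

-- ===== PRECONDITION & SPEC =====
def Spec_AutoSisNum (entrada : String) (out : Bool × Option String) : Prop := out = AutoSisNum_alt entrada
instance (entrada : String) (out : Bool × Option String) : Decidable (Spec_AutoSisNum entrada out) := by unfold Spec_AutoSisNum; infer_instance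

-- ===== CLAIM =====
def Claim_equal_AutoSisNum : Prop := ∀ (entrada : String), Dom_AutoSisNum entrada → Spec_AutoSisNum entrada (AutoSisNum entrada)


-- ===== LEMMAS AND PROOFS =====

-- A's post-processing of the loop result
def postA (r : Int × Option String × List Char) : Bool × Option String :=
  (decide (r.1 ∈ ([3, 4, 5, 7, 8] : List Int)),
   if r.1 = 2 ∧ r.2.2 = [] then some "2" else r.2.1)

-- reduction of pasoA at each concrete state
lemma pasoA_0 (c : Char) : pasoA 0 c =
    (if c = '0' then .inl 1 else if c = '.' then .inl 6
     else if '1' ≤ c ∧ c ≤ '9' then .inl 5 else .inr "0") := by norm_num [pasoA]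
lemma pasoA_1 (c : Char) : pasoA 1 c =
    (if c = '.' then .inl 6 else if c = 'X' then .inl 2
     else if '0' ≤ c ∧ c ≤ '7' then .inl 8 else .inr "1") := by norm_num [pasoA]
lemma pasoA_2 (c : Char) : pasoA 2 c =
    (if ('A' ≤ c ∧ c ≤ 'F') ∨ ('0' ≤ c ∧ c ≤ '9') then .inl 3 else .inr "2") := by norm_num [pasoA]
lemma pasoA_3 (c : Char) : pasoA 3 c =
    (if ('A' ≤ c ∧ c ≤ 'F') ∨ ('0' ≤ c ∧ c ≤ '9') then .inl 4 else .inr "3") := by norm_num [pasoA]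
lemma pasoA_4 (c : Char) : pasoA 4 c =
    (if ('A' ≤ c ∧ c ≤ 'F') ∨ ('0' ≤ c ∧ c ≤ '9') then .inl 3 else .inr "4") := by norm_num [pasoA]
lemma pasoA_5 (c : Char) : pasoA 5 c =
    (if c = '.' then .inl 6 else if '0' ≤ c ∧ c ≤ '9' then .inl 5 else .inr "5") := by norm_num [pasoA]
lemma pasoA_6 (c : Char) : pasoA 6 c =
    (if '0' ≤ c ∧ c ≤ '9' then .inl 7 else .inr "6") := by norm_num [pasoA]
lemma pasoA_7 (c : Char) : pasoA 7 c =
    (if '0' ≤ c ∧ c ≤ '9' then .inl 7 else .inr "7") := by norm_num [pasoA]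
lemma pasoA_8 (c : Char) : pasoA 8 c =
    (if '0' ≤ c ∧ c ≤ '7' then .inl 8 else .inr "8") := by norm_num [pasoA]

lemma bIsDigit_false {c : Char} (h : ¬ ('0' ≤ c ∧ c ≤ '9')) : bIsDigit c = false := by
  simp only [bIsDigit, Bool.and_eq_false_iff, decide_eq_false_iff_not]; tauto
lemma bIsOct_false {c : Char} (h : ¬ ('0' ≤ c ∧ c ≤ '7')) : bIsOct c = false := by
  simp only [bIsOct, Bool.and_eq_false_iff, decide_eq_false_iff_not]; tauto
lemma bIsHex_true {c : Char} (h : ('A' ≤ c ∧ c ≤ 'F') ∨ ('0' ≤ c ∧ c ≤ '9')) : bIsHex c = true := by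
  rcases h with h | h <;> simp [bIsHex, bIsDigit, h.1, h.2]
lemma bIsHex_iff (c : Char) : bIsHex c = true ↔ (('A' ≤ c ∧ c ≤ 'F') ∨ ('0' ≤ c ∧ c ≤ '9')) := by
  simp only [bIsHex, bIsDigit, Bool.or_eq_true, Bool.and_eq_true, decide_eq_true_eq]
  tauto
lemma bIsHex_false {c : Char} (h : ¬ (('A' ≤ c ∧ c ≤ 'F') ∨ ('0' ≤ c ∧ c ≤ '9'))) : bIsHex c = false := by
  rw [Bool.eq_false_iff]
  intro ht
  exact h ((bIsHex_iff c).1 ht)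

lemma lem8 : ∀ cs, postA (loopA cs 8) = bOctal cs := by
  intro cs
  induction cs with
  | nil => decide
  | cons c rest ih =>
    by_cases h : '0' ≤ c ∧ c ≤ '7'
    · have hb : bIsOct c = true := by simp [bIsOct, h.1, h.2]
      simp only [loopA, pasoA_8, if_pos h, bOctal, bRun, hb, if_true]
      simpa [bOctal] using ih
    · simp [loopA, pasoA_8, h, bOctal, bRun, bIsOct_false h, postA]

lemma lem7 : ∀ cs, postA (loopA cs 7) =
    (if (bRun bIsDigit cs).2 = [] then (true, none) else (true, some "7")) := by
  intro cs
  induction cs with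
  | nil => decide
  | cons c rest ih =>
    by_cases h : '0' ≤ c ∧ c ≤ '9'
    · have hb : bIsDigit c = true := by simp [bIsDigit, h.1, h.2]
      simp only [loopA, pasoA_7, if_pos h, bRun, hb, if_true]
      exact ih
    · simp [loopA, pasoA_7, h, bRun, bIsDigit_false h, postA]

lemma lem6 : ∀ cs, postA (loopA cs 6) = bFrac cs := by
  intro cs
  cases cs with
  | nil => decide
  | cons c rest =>
    by_cases h : '0' ≤ c ∧ c ≤ '9'
    · have hb : bIsDigit c = true := by simp [bIsDigit, h.1, h.2]
      simp only [loopA, pasoA_6, if_pos h, bFrac, bRun, hb, if_true]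
      rw [lem7 rest]
      rcases hr : (bRun bIsDigit rest) with ⟨n, l⟩
      by_cases hl : l = [] <;> simp [hl]
    · simp [loopA, pasoA_6, h, bFrac, bRun, bIsDigit_false h, postA]

lemma lem5 : ∀ cs, postA (loopA cs 5) = bDecimal cs := by
  intro cs
  induction cs with
  | nil => decide
  | cons c rest ih =>
    by_cases hdot : c = '.'
    · subst hdot
      have hb : bIsDigit '.' = false := by decide
      simp only [loopA, pasoA_5, bDecimal, bRun, hb, if_false, Bool.false_eq_true]
      simpa using lem6 rest
    · by_cases h : '0' ≤ c ∧ c ≤ '9'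
      · have hb : bIsDigit c = true := by simp [bIsDigit, h.1, h.2]
        simp only [loopA, pasoA_5, if_neg hdot, if_pos h, bDecimal, bRun, hb, if_true]
        simpa [bDecimal] using ih
      · simp [loopA, pasoA_5, hdot, h, bDecimal, bRun, bIsDigit_false h, postA]

-- states 3 and 4 together: the error code is determined by the parity of the hex run
lemma lem34 : ∀ cs,
    (postA (loopA cs 3) =
      (if (bRun bIsHex cs).2 = [] then (true, none)
       else if (bRun bIsHex cs).1 % 2 = 0 then (true, some "3") else (true, some "4"))) ∧
    (postA (loopA cs 4) =
      (if (bRun bIsHex cs).2 = [] then (true, none)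
       else if (bRun bIsHex cs).1 % 2 = 0 then (true, some "4") else (true, some "3"))) := by
  intro cs
  induction cs with
  | nil => decide
  | cons c rest ih =>
    by_cases h : ('A' ≤ c ∧ c ≤ 'F') ∨ ('0' ≤ c ∧ c ≤ '9')
    · have hb := bIsHex_true h
      constructor
      · simp only [loopA, pasoA_3, if_pos h, bRun, hb, if_true]
        rw [ih.2]
        rcases hr : (bRun bIsHex rest) with ⟨n, l⟩
        by_cases hl : l = []
        · simp [hl]
        · by_cases hp : n % 2 = 0
          · have h1 : ¬ ((n + 1) % 2 = 0) := by omega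
            simp [hl, hp, h1]
          · have h1 : (n + 1) % 2 = 0 := by omega
            simp [hl, hp, h1]
      · simp only [loopA, pasoA_4, if_pos h, bRun, hb, if_true]
        rw [ih.1]
        rcases hr : (bRun bIsHex rest) with ⟨n, l⟩
        by_cases hl : l = []
        · simp [hl]
        · by_cases hp : n % 2 = 0
          · have h1 : ¬ ((n + 1) % 2 = 0) := by omega
            simp [hl, hp, h1]
          · have h1 : (n + 1) % 2 = 0 := by omega
            simp [hl, hp, h1]
    · have hb := bIsHex_false h
      constructor <;> simp [loopA, pasoA_3, pasoA_4, h, bRun, hb, postA]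

lemma lem2 : ∀ cs, postA (loopA cs 2) = bHex cs := by
  intro cs
  cases cs with
  | nil => decide
  | cons c rest =>
    by_cases h : ('A' ≤ c ∧ c ≤ 'F') ∨ ('0' ≤ c ∧ c ≤ '9')
    · have hb := bIsHex_true h
      simp only [loopA, pasoA_2, if_pos h, bHex, bRun, hb, if_true]
      rw [(lem34 rest).1]
      rcases hr : (bRun bIsHex rest) with ⟨n, l⟩
      by_cases hl : l = []
      · simp [hl]
      · by_cases hp : n % 2 = 0
        · have h1 : (n + 1) % 2 = 1 := by omega
          simp [hl, hp, h1]
        · have h1 : ¬ ((n + 1) % 2 = 1) := by omega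
          simp [hl, hp, h1]
    · have hb := bIsHex_false h
      simp [loopA, pasoA_2, h, bHex, bRun, hb, postA]

lemma lem1 : ∀ cs,
    postA (loopA cs 1) =
      (match cs with
       | [] => (false, none)
       | d :: rest2 =>
         if d = '.' then bFrac rest2
         else if d = 'X' then bHex rest2
         else if bIsOct d then bOctal rest2
         else (false, some "1")) := by
  intro cs
  cases cs with
  | nil => decide
  | cons d rest2 =>
    by_cases hdot : d = '.'
    · subst hdot
      simp only [loopA, pasoA_1]
      simpa using lem6 rest2
    · by_cases hX : d = 'X'
      · subst hX
        simp only [loopA, pasoA_1, if_neg (by decide : ¬ ('X' : Char) = '.')]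
        simpa [hdot] using lem2 rest2
      · by_cases h : '0' ≤ d ∧ d ≤ '7'
        · have hb : bIsOct d = true := by simp [bIsOct, h.1, h.2]
          simp only [loopA, pasoA_1, if_neg hdot, if_neg hX, if_pos h, hb, if_true]
          exact lem8 rest2
        · simp [loopA, pasoA_1, hdot, hX, h, bIsOct_false h, postA]

-- ===== VERDICT =====
theorem AutoSisNum_spec : Claim_equal_AutoSisNum := by
  intro entrada _
  unfold Spec_AutoSisNum
  show postA (loopA entrada.toList 0) = AutoSisNum_alt entrada
  unfold AutoSisNum_alt
  cases hcs : entrada.toList with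
  | nil => decide
  | cons c rest =>
    by_cases hz : c = '0'
    · subst hz
      rw [show loopA ('0' :: rest) 0 = loopA rest 1 from by simp [loopA, pasoA_0]]
      rw [lem1 rest]
      have h9 : ¬ ((decide ('1' ≤ '0') && decide (('0':Char) ≤ '9')) = true) := by decide
      have hd : ¬ (('0':Char) = '.') := by decide
      cases rest <;> simp [hd]
    · by_cases hdot : c = '.'
      · subst hdot
        rw [show loopA ('.' :: rest) 0 = loopA rest 6 from by simp [loopA, pasoA_0]]
        rw [lem6 rest]
        simp
      · by_cases h : '1' ≤ c ∧ c ≤ '9'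
        · have hb : (decide ('1' ≤ c) && decide (c ≤ '9')) = true := by simp [h.1, h.2]
          simp only [loopA, pasoA_0, if_neg hz, if_neg hdot, if_pos h, hb, if_true]
          exact lem5 rest
        · have hb : (decide ('1' ≤ c) && decide (c ≤ '9')) = false := by
            simp only [Bool.and_eq_false_iff, decide_eq_false_iff_not]; tauto
          simp [loopA, pasoA_0, hz, hdot, h, hb, postA]
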